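-- pv_equiv track=rewrite | github.com/dhirajpatra/python_essentials | alogorithms/single-source-shortest-paths-improvment-dijkstra.py | _count_subtree_descendants
-- ===== SOURCE A (Python) =====
-- from collections import defaultdict, deque
-- from typing import List, Tuple, Dict, Set, Optional
--
-- def _count_subtree_descendants(pred: List[Optional[int]], root: int, W: Set[int]) -> int:
--     """Count descendants of root in W using pred tree (BFS)."""
--     if pred[root] is not None:
--         return 0  # Not root
--     count = 1
--     queue = deque([root])
--     visited = set()
--     while queue:
--         u = queue.popleft()
--         if u in visited:
--             continue
--         visited.add(u)
--         for v in range(len(pred)):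
--             if pred[v] == u and v in W:
--                 count += 1
--                 queue.append(v)
--     return count
-- ===== SOURCE B (Python) =====
-- def _count_subtree_descendants(pred, root, W):
--     """Count descendants of root in W: for each node, climb its predecessor chain to root."""
--     if pred[root] is not None:
--         return 0
--     count = 1
--     for v in range(len(pred)):
--         if v in W and _climbs_to_root(pred, root, W, v):
--             count += 1
--     return count
--
--
-- def _climbs_to_root(pred, root, W, v):
--     # Follow predecessors upward from v; every intermediate node must lie in W.
--     # A successful chain is simple, so len(pred) steps always suffice.
--     u = pred[v]
--     for _ in range(len(pred)):
--         if u == root: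
--             return True
--         if u is None or not (0 <= u < len(pred)) or u not in W:
--             return False
--         u = pred[u]
--     return False
-- ===== Notes on version B (the rewrite author's own statement) =====
-- stated objective: alternative
-- what changed: B drops the BFS with queue and visited set entirely: for each node it independently climbs the predecessor chain toward the root, counting nodes in W whose whole chain stays inside W.
import Mathlib
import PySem

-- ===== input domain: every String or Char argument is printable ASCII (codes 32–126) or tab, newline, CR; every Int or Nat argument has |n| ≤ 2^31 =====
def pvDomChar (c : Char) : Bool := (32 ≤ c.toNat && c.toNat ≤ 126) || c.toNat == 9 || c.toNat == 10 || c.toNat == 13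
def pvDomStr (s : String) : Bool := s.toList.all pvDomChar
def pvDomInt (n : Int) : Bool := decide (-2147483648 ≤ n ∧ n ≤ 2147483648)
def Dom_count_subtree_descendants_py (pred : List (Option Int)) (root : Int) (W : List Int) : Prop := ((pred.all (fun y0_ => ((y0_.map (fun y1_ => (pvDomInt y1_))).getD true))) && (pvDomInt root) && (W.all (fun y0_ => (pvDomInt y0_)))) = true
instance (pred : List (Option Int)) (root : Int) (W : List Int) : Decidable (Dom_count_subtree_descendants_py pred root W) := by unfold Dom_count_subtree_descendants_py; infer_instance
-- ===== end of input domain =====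

-- B replaces A's BFS (queue + visited set + full rescan of pred per dequeued node) by an independent
-- per-node predecessor-chain climb toward the root; a genuinely different algorithm, similar cost.

-- ===== PORT A =====
-- BFS loop of A: pop u; skip if visited; else scan all v in range(len(pred)) for pred[v] == u and v in W.
-- Fuel pred.length + 1 bounds the number of pops (proved sufficient below; the Python loop never needs more).
def aLoop (pred : List (Option Int)) (W : List Int) :
    Nat → List Int → PySem.Set Int → Int → Int
  | 0, _, _, count => count
  | _ + 1, [], _, count => count
  | fuel + 1, u :: queue, visited, count =>
    if PySem.Set.contains visited u then aLoop pred W fuel queue visited count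
    else
      let visited' := PySem.Set.add visited u
      let st := (PySem.List.pyRange 0 (pred.length : Int) 1).foldl
        (fun (st : Int × List Int) v =>
          if (PySem.List.pyGetD pred v none == some u) && W.contains v
          then (st.1 + 1, st.2 ++ [v]) else st) (count, queue)
      aLoop pred W fuel st.2 visited' st.1

def count_subtree_descendants_py (pred : List (Option Int)) (root : Int) (W : List Int) : Int :=
  match PySem.List.pyGet? pred root with
  | none => 0                 -- IndexError in Python; excluded by Pre_
  | some (some _) => 0        -- pred[root] is not None
  | some none => aLoop pred W (pred.length + 1) [root] PySem.Set.empty 1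

-- ===== PORT B =====
-- _climbs_to_root's 'for _ in range(len(pred))' loop: one constructor layer per iteration.
def climbB (pred : List (Option Int)) (root : Int) (W : List Int) :
    Nat → Option Int → Bool
  | 0, _ => false
  | fuel + 1, u =>
    if u == some root then true
    else
      match u with
      | none => false
      | some x =>
        if decide (0 ≤ x) && decide (x < (pred.length : Int)) && W.contains x then
          climbB pred root W fuel (PySem.List.pyGetD pred x none)
        else false

def count_subtree_descendants_py_alt (pred : List (Option Int)) (root : Int) (W : List Int) : Int :=
  match PySem.List.pyGet? pred root with
  | none => 0                 -- IndexError in Python; excluded by Pre_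
  | some (some _) => 0
  | some none =>
    (PySem.List.pyRange 0 (pred.length : Int) 1).foldl
      (fun count v =>
        if W.contains v && climbB pred root W pred.length (PySem.List.pyGetD pred v none)
        then count + 1 else count) 1

-- ===== PRECONDITION & SPEC =====
-- Pre_ excludes exactly the root indices out of range, where Python's pred[root] raises IndexError.
def Pre_count_subtree_descendants_py (pred : List (Option Int)) (root : Int) (W : List Int) : Prop :=
  PySem.Raise.InRange pred.length root
instance (pred : List (Option Int)) (root : Int) (W : List Int) : Decidable (Pre_count_subtree_descendants_py pred root W) := by unfold Pre_count_subtree_descendants_py; infer_instance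
def pvWitness_count_subtree_descendants_py : List (Option Int) × Int × List Int :=
  ([none, some 0, some 0], 0, [1, 2])

def Spec_count_subtree_descendants_py (pred : List (Option Int)) (root : Int) (W : List Int) (out : Int) : Prop := out = count_subtree_descendants_py_alt pred root W
instance (pred : List (Option Int)) (root : Int) (W : List Int) (out : Int) : Decidable (Spec_count_subtree_descendants_py pred root W out) := by unfold Spec_count_subtree_descendants_py; infer_instance

-- ===== CLAIM (what is proved, stated in full; the proofs are below) =====
def Claim_equal_count_subtree_descendants_py : Prop := ∀ (pred : List (Option Int)) (root : Int) (W : List Int), Dom_count_subtree_descendants_py pred root W → Pre_count_subtree_descendants_py pred root W → Spec_count_subtree_descendants_py pred root W (count_subtree_descendants_py pred root W)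

-- ===== LEMMAS AND PROOFS =====

-- 'v is k+1 predecessor-steps below root with every chain node, root excepted, inside W',
-- phrased on the Option Int the climb carries (Rk 0 u: u is the root itself).
def Rk (pred : List (Option Int)) (root : Int) (W : List Int) : Nat → Option Int → Prop
  | 0, u => u = some root
  | k + 1, u => ∃ x, u = some x ∧ 0 ≤ x ∧ x < (pred.length : Int) ∧ W.contains x = true ∧
      Rk pred root W k (PySem.List.pyGetD pred x none)

-- the nodes A counts: in range, in W, with a chain to root
def ChainV (pred : List (Option Int)) (root : Int) (W : List Int) (x : Int) : Prop :=
  0 ≤ x ∧ x < (pred.length : Int) ∧ W.contains x = true ∧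
    ∃ k, Rk pred root W k (PySem.List.pyGetD pred x none)

-- children of u that A's inner scan collects
def chW (pred : List (Option Int)) (W : List Int) (u : Int) : List Int :=
  (PySem.List.pyRange 0 (pred.length : Int) 1).filter
    (fun v => (PySem.List.pyGetD pred v none == some u) && W.contains v)

-- B's per-node test
def pB (pred : List (Option Int)) (root : Int) (W : List Int) (v : Int) : Bool :=
  W.contains v && climbB pred root W pred.length (PySem.List.pyGetD pred v none)

-- A's inner scan, with its (count, queue) accumulator, collects exactly chW u
theorem inner_fold_eq (pred : List (Option Int)) (W : List Int) (u : Int)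
    (l : List Int) (c : Int) (q : List Int) :
    l.foldl (fun (st : Int × List Int) v =>
        if (PySem.List.pyGetD pred v none == some u) && W.contains v
        then (st.1 + 1, st.2 ++ [v]) else st) (c, q)
      = (c + ((l.filter (fun v => (PySem.List.pyGetD pred v none == some u) && W.contains v)).length : Int),
         q ++ l.filter (fun v => (PySem.List.pyGetD pred v none == some u) && W.contains v)) := by
  induction l generalizing c q with
  | nil => simp
  | cons a l ih =>
    simp only [List.foldl_cons, List.filter_cons]
    by_cases hp : ((PySem.List.pyGetD pred a none == some u) && W.contains a) = true
    · rw [if_pos hp, if_pos hp, ih]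
      simp only [Prod.mk.injEq, List.cons_append, List.append_assoc]
      constructor
      · simp only [List.length_cons]; push_cast; ring
      · simp
    · rw [if_neg hp, if_neg hp, ih]

-- climbB decides reachability within its fuel
theorem climb_iff (pred : List (Option Int)) (root : Int) (W : List Int) :
    ∀ (fuel : Nat) (u : Option Int),
      climbB pred root W fuel u = true ↔ ∃ k, k < fuel ∧ Rk pred root W k u := by
  intro fuel
  induction fuel with
  | zero => intro u; simp [climbB]
  | succ fuel ih =>
    intro u
    by_cases hr : u = some root
    · subst hr
      simp only [climbB, beq_self_eq_true, if_pos]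
      constructor
      · intro _; exact ⟨0, Nat.succ_pos _, rfl⟩
      · intro _; trivial
      
    · have hbe : (u == some root) = false := by
        cases hb : u == some root
        · rfl
        · exact absurd (eq_of_beq hb) hr
      cases u with
      | none =>
        simp only [climbB, hbe, Bool.false_eq_true, if_false]
        constructor
        · intro hfalse; exact absurd hfalse (by simp)
        · rintro ⟨k, _, hk⟩
          cases k with
          | zero => exact absurd hk (by simp [Rk])
          | succ k => obtain ⟨x, hx, _⟩ := hk; exact absurd hx (by simp)
      | some x =>
        simp only [climbB, hbe, Bool.false_eq_true, if_false]
        by_cases hc : (decide (0 ≤ x) && decide (x < (pred.length : Int)) && W.contains x) = true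
        · rw [if_pos hc, ih]
          simp only [Bool.and_eq_true, decide_eq_true_eq] at hc
          constructor
          · rintro ⟨k, hk, hRk⟩
            exact ⟨k + 1, Nat.succ_lt_succ hk, x, rfl, hc.1.1, hc.1.2, hc.2, hRk⟩
          · rintro ⟨k, hk, hRk⟩
            cases k with
            | zero => exact absurd (Option.some.inj hRk) (fun he => hr (by rw [he]))
            | succ k =>
              obtain ⟨y, hy, _, _, _, hRk'⟩ := hRk
              cases Option.some.inj hy
              exact ⟨k, Nat.lt_of_succ_lt_succ hk, hRk'⟩
        · rw [if_neg hc]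
          constructor
          · intro hfalse; exact absurd hfalse (by simp)
          · rintro ⟨k, _, hRk⟩
            cases k with
            | zero => exact absurd (Option.some.inj hRk) (fun he => hr (by rw [he]))
            | succ k =>
              obtain ⟨y, hy, h0, h1, hW, _⟩ := hRk
              cases Option.some.inj hy
              exact absurd (by
                rw [Bool.and_eq_true, Bool.and_eq_true]
                exact ⟨⟨by simpa using h0, by simpa using h1⟩, hW⟩) hc

-- chains are deterministic in length (uses pred[root] = None)
theorem Rk_unique (pred : List (Option Int)) (root : Int) (W : List Int)
    (hroot : PySem.List.pyGet? pred root = some none) :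
    ∀ k j u, Rk pred root W k u → Rk pred root W j u → k = j := by
  have hdead : ∀ j, ¬ Rk pred root W j (some root) ∨ j = 0 := by
    intro j
    cases j with
    | zero => exact Or.inr rfl
    | succ j =>
      left
      rintro ⟨x, hx, h0, _, _, hRk⟩
      cases Option.some.inj hx
      rw [show PySem.List.pyGetD pred root none = none by
        simp [PySem.List.pyGetD, hroot]] at hRk
      cases j with
      | zero => exact absurd hRk (by simp [Rk])
      | succ j => obtain ⟨y, hy, _⟩ := hRk; exact absurd hy (by simp)
  intro k
  induction k with
  | zero =>
    intro j u hk hj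
    rw [show u = some root from hk] at hj
    rcases hdead j with h | h
    · exact absurd hj h
    · omega
  | succ k ih =>
    intro j u hk hj
    obtain ⟨x, hx, h0x, h1x, hWx, hk'⟩ := hk
    subst hx
    cases j with
    | zero =>
      have hx : x = root := Option.some.inj hj
      subst hx
      rcases hdead (k + 1) with h | h
      · exact absurd ⟨x, rfl, h0x, h1x, hWx, hk'⟩ h
      · omega
    | succ j =>
      obtain ⟨y, hy, _, _, _, hj'⟩ := hj
      cases Option.some.inj hy
      rw [ih j _ hk' hj']

-- a k-chain yields k distinct in-range nodes, hence k ≤ len(pred)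
theorem Rk_le (pred : List (Option Int)) (root : Int) (W : List Int)
    (hroot : PySem.List.pyGet? pred root = some none) :
    ∀ k u, Rk pred root W k u → k ≤ pred.length := by
  have key : ∀ k u, Rk pred root W k u →
      ∃ L : List Int, L.length = k ∧ L.Nodup ∧
        (∀ x ∈ L, 0 ≤ x ∧ x < (pred.length : Int)) ∧
        (∀ x ∈ L, ∃ i, 1 ≤ i ∧ i ≤ k ∧ Rk pred root W i (some x)) := by
    intro k
    induction k with
    | zero => intro u _; exact ⟨[], rfl, List.nodup_nil, by simp, by simp⟩
    | succ k ih =>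
      intro u hu
      obtain ⟨x, hx, h0, h1, hW, hk'⟩ := hu
      obtain ⟨L, hlen, hnd, hbd, hwit⟩ := ih _ hk'
      refine ⟨x :: L, by simp [hlen], ?_, ?_, ?_⟩
      · refine List.nodup_cons.mpr ⟨?_, hnd⟩
        intro hmem
        obtain ⟨i, hi1, hik, hRi⟩ := hwit x hmem
        have : i = k + 1 := Rk_unique pred root W hroot i (k + 1) (some x) hRi
          ⟨x, rfl, h0, h1, hW, hk'⟩
        omega
      · intro y hy
        rcases List.mem_cons.mp hy with rfl | h
        · exact ⟨h0, h1⟩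
        · exact hbd y h
      · intro y hy
        rcases List.mem_cons.mp hy with rfl | h
        · exact ⟨k + 1, by omega, le_refl _, y, rfl, h0, h1, hW, hk'⟩
        · obtain ⟨i, hi1, hik, hRi⟩ := hwit y h
          exact ⟨i, hi1, by omega, hRi⟩
  intro k u hk
  obtain ⟨L, hlen, hnd, hbd, _⟩ := key k u hk
  have hsub : L.toFinset ⊆ Finset.Icc (0 : Int) ((pred.length : Int) - 1) := by
    intro x hx
    have := hbd x (List.mem_toFinset.mp hx)
    simp only [Finset.mem_Icc]
    omega
  have hcard := Finset.card_le_card hsub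
  rw [List.toFinset_card_of_nodup hnd, hlen, Int.card_Icc] at hcard
  omega

theorem chain_lt (pred : List (Option Int)) (root : Int) (W : List Int)
    (hroot : PySem.List.pyGet? pred root = some none)
    (x : Int) (hx0 : 0 ≤ x) (hx1 : x < (pred.length : Int)) (hxW : W.contains x = true)
    (k : Nat) (hk : Rk pred root W k (PySem.List.pyGetD pred x none)) : k < pred.length := by
  have : Rk pred root W (k + 1) (some x) := ⟨x, rfl, hx0, hx1, hxW, hk⟩
  have := Rk_le pred root W hroot (k + 1) (some x) this
  omega

-- at a terminal state (empty queue) the visited set is exactly {root} plus the nodes B counts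
theorem terminal_count (pred : List (Option Int)) (root : Int) (W : List Int)
    (hroot : PySem.List.pyGet? pred root = some none) (vis : PySem.Set Int)
    (h3 : vis.Nodup)
    (h4 : ∀ x, x ∈ vis ↔
      (x = root ∨ (0 ≤ x ∧ x < (pred.length : Int) ∧ W.contains x = true ∧
        ∃ u, u ∈ vis ∧ PySem.List.pyGetD pred x none = some u)))
    (h5 : ∀ x, x ∈ vis → x = root ∨ ChainV pred root W x) :
    vis.length = 1 + (PySem.List.pyRange 0 (pred.length : Int) 1).countP (pB pred root W) := by
  have hrv : root ∈ vis := (h4 root).mpr (Or.inl rfl)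
  have closed : ∀ (k : Nat) (x : Int), 0 ≤ x → x < (pred.length : Int) → W.contains x = true →
      Rk pred root W k (PySem.List.pyGetD pred x none) → x ∈ vis := by
    intro k
    induction k with
    | zero =>
      intro x h0 h1 hW hRk
      exact (h4 x).mpr (Or.inr ⟨h0, h1, hW, root, hrv, hRk⟩)
    | succ k ih =>
      intro x h0 h1 hW hRk
      obtain ⟨y, hy, hy0, hy1, hyW, hRk'⟩ := hRk
      exact (h4 x).mpr (Or.inr ⟨h0, h1, hW, y, ih y hy0 hy1 hyW hRk', hy⟩)
  have hpredroot : PySem.List.pyGetD pred root none = none := by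
    simp [PySem.List.pyGetD, hroot]
  have hrootnf : root ∉ (PySem.List.pyRange 0 (pred.length : Int) 1).filter (pB pred root W) := by
    intro hmem
    rcases List.mem_filter.mp hmem with ⟨_, hp⟩
    rcases Bool.and_eq_true_iff.mp hp with ⟨_, hcl⟩
    obtain ⟨k, _, hRk⟩ := (climb_iff pred root W pred.length _).mp hcl
    rw [hpredroot] at hRk
    cases k with
    | zero => exact absurd hRk (by simp [Rk])
    | succ k => obtain ⟨y, hy, _⟩ := hRk; exact absurd hy (by simp)
  have hmemiff : ∀ x, x ∈ vis ↔
      x ∈ root :: (PySem.List.pyRange 0 (pred.length : Int) 1).filter (pB pred root W) := by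
    intro x
    constructor
    · intro hx
      rcases h5 x hx with rfl | ⟨h0, h1, hW, k, hRk⟩
      · exact List.mem_cons_self ..
      · refine List.mem_cons.mpr (Or.inr (List.mem_filter.mpr ⟨?_, ?_⟩))
        · exact PySem.List.mem_pyRange_one.mpr ⟨h0, h1⟩
        · refine Bool.and_eq_true_iff.mpr ⟨hW, (climb_iff pred root W pred.length _).mpr
            ⟨k, chain_lt pred root W hroot x h0 h1 hW k hRk, hRk⟩⟩
    · intro hx
      rcases List.mem_cons.mp hx with rfl | hx
      · exact hrv
      · rcases List.mem_filter.mp hx with ⟨hr, hp⟩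
        rcases PySem.List.mem_pyRange_one.mp hr with ⟨h0, h1⟩
        rcases Bool.and_eq_true_iff.mp hp with ⟨hW, hcl⟩
        obtain ⟨k, _, hRk⟩ := (climb_iff pred root W pred.length _).mp hcl
        exact closed k x h0 h1 hW hRk
  have hnd2 : (root :: (PySem.List.pyRange 0 (pred.length : Int) 1).filter (pB pred root W)).Nodup :=
    List.nodup_cons.mpr ⟨hrootnf, (PySem.List.nodup_pyRange_one 0 (pred.length : Int)).filter _⟩
  have hperm := (List.perm_ext_iff_of_nodup h3 hnd2).mpr hmemiff
  rw [hperm.length_eq, List.length_cons, List.countP_eq_length_filter]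
  omega

-- the main BFS invariant: A's loop, from any invariant-satisfying state with enough fuel,
-- returns 1 + |{v in range(len(pred)) : B counts v}|
theorem aLoop_spec (pred : List (Option Int)) (root : Int) (W : List Int)
    (hroot : PySem.List.pyGet? pred root = some none) :
    ∀ (fuel : Nat) (queue : List Int) (vis : PySem.Set Int) (c : Int),
      queue.Nodup →
      (∀ q ∈ queue, q ∉ vis) →
      vis.Nodup →
      c = (vis.length : Int) + queue.length →
      (∀ x, (x ∈ vis ∨ x ∈ queue) ↔
        (x = root ∨ (0 ≤ x ∧ x < (pred.length : Int) ∧ W.contains x = true ∧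
          ∃ u, u ∈ vis ∧ PySem.List.pyGetD pred x none = some u))) →
      (∀ x, (x ∈ vis ∨ x ∈ queue) → x = root ∨ ChainV pred root W x) →
      pred.length + 1 ≤ fuel + vis.length →
      aLoop pred W fuel queue vis c
        = 1 + (((PySem.List.pyRange 0 (pred.length : Int) 1).countP (pB pred root W) : Nat) : Int) := by
  intro fuel
  induction fuel with
  | zero =>
    intro queue vis c h1 h2 h3 hc h4 h5 hfuel
    -- with no fuel left the visited set is already full, so the queue must be empty
    have hqnil : queue = [] := by
      cases queue with
      | nil => rfl
      | cons q qs =>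
        exfalso
        have hsub : vis.toFinset ⊆ insert root (Finset.Icc (0 : Int) ((pred.length : Int) - 1)) := by
          intro x hx
          rcases ((h4 x).mp (Or.inl (List.mem_toFinset.mp hx))) with rfl | ⟨h0, h1, _⟩
          · exact Finset.mem_insert_self ..
          · exact Finset.mem_insert_of_mem (Finset.mem_Icc.mpr ⟨h0, by omega⟩)
        have hcardT : (insert root (Finset.Icc (0 : Int) ((pred.length : Int) - 1))).card
            ≤ pred.length + 1 := by
          refine le_trans (Finset.card_insert_le ..) ?_
          rw [Int.card_Icc]
          omega
        have hlen : pred.length + 1 ≤ vis.length := by omega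
        have hvc : vis.toFinset.card = vis.length := List.toFinset_card_of_nodup h3
        have heq : vis.toFinset = insert root (Finset.Icc (0 : Int) ((pred.length : Int) - 1)) :=
          Finset.eq_of_subset_of_card_le hsub (by omega)
        have hq : q ∈ vis := by
          have hqT : q ∈ insert root (Finset.Icc (0 : Int) ((pred.length : Int) - 1)) := by
            rcases ((h4 q).mp (Or.inr (List.mem_cons_self ..))) with rfl | ⟨h0, h1, _⟩
            · exact Finset.mem_insert_self ..
            · exact Finset.mem_insert_of_mem (Finset.mem_Icc.mpr ⟨h0, by omega⟩)
          exact List.mem_toFinset.mp (heq ▸ hqT)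
        exact h2 q (List.mem_cons_self ..) hq
    subst hqnil
    have ht := terminal_count pred root W hroot vis h3 (by simpa using h4) (fun x hx => h5 x (Or.inl hx))
    show c = _
    rw [hc, ht]
    push_cast
    simp
  | succ fuel ih =>
    intro queue vis c h1 h2 h3 hc h4 h5 hfuel
    cases queue with
    | nil =>
      have ht := terminal_count pred root W hroot vis h3 (by simpa using h4) (fun x hx => h5 x (Or.inl hx))
      show c = _
      rw [hc, ht]
      push_cast
      simp
    | cons u queue =>
      have hu_nvis : u ∉ vis := h2 u (List.mem_cons_self ..)
      have hcontains : PySem.Set.contains vis u = false := by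
        cases hb : PySem.Set.contains vis u
        · rfl
        · exact absurd ((PySem.Set.contains_iff vis u).mp hb) hu_nvis
      have hadd : PySem.Set.add vis u = vis ++ [u] := by
        rw [show PySem.Set.add vis u
            = if PySem.Set.contains vis u = true then vis else vis ++ [u] from rfl, hcontains]
        simp
      simp only [aLoop, hcontains, Bool.false_eq_true, if_false, hadd, inner_fold_eq]
      -- membership description of the scanned children
      have hch : ∀ v, v ∈ (PySem.List.pyRange 0 (pred.length : Int) 1).filter
            (fun v => (PySem.List.pyGetD pred v none == some u) && W.contains v)
          ↔ (0 ≤ v ∧ v < (pred.length : Int) ∧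
              PySem.List.pyGetD pred v none = some u ∧ W.contains v = true) := by
        intro v
        rw [List.mem_filter, PySem.List.mem_pyRange_one]
        constructor
        · rintro ⟨⟨h0, h1⟩, hp⟩
          rcases Bool.and_eq_true_iff.mp hp with ⟨he, hW⟩
          exact ⟨h0, h1, eq_of_beq he, hW⟩
        · rintro ⟨h0, h1, he, hW⟩
          exact ⟨⟨h0, h1⟩, Bool.and_eq_true_iff.mpr ⟨by simp [he], hW⟩⟩
      set ch := (PySem.List.pyRange 0 (pred.length : Int) 1).filter
        (fun v => (PySem.List.pyGetD pred v none == some u) && W.contains v) with hchdef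
      -- a scanned child is brand new: not in vis and not in u :: queue
      have hnew : ∀ v ∈ ch, ¬ (v ∈ vis ∨ v ∈ u :: queue) := by
        intro v hv hold
        rcases (hch v).mp hv with ⟨h0, h1, he, _⟩
        rcases (h4 v).mp hold with rfl | ⟨_, _, _, u', hu'vis, he'⟩
        · rw [show PySem.List.pyGetD pred v none = none by simp [PySem.List.pyGetD, hroot]] at he
          exact absurd he (by simp)
        · rw [he] at he'
          exact hu_nvis (Option.some.inj he' ▸ hu'vis)
      have hchnd : ch.Nodup := (PySem.List.nodup_pyRange_one 0 (pred.length : Int)).filter _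
      have hqnd : queue.Nodup := (List.nodup_cons.mp h1).2
      have hunq : u ∉ queue := (List.nodup_cons.mp h1).1
      refine ih (queue ++ ch) (vis ++ [u]) (c + (ch.length : Int)) ?_ ?_ ?_ ?_ ?_ ?_ ?_
      · refine List.nodup_append.mpr ⟨hqnd, hchnd, ?_⟩
        intro a ha b hb rfl
        exact hnew a hb (Or.inr (List.mem_cons_of_mem u ha))
      · intro q hq
        rw [List.mem_append] at hq ⊢
        rcases hq with hq | hq
        · rintro (hqv | hqu)
          · exact h2 q (List.mem_cons_of_mem u hq) hqv
          · have hq' := List.mem_singleton.mp hqu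
            subst hq'
            exact hunq hq
        · rintro (hqv | hqu)
          · exact hnew q hq (Or.inl hqv)
          · exact hnew q hq (Or.inr (List.mem_cons.mpr (Or.inl (List.mem_singleton.mp hqu))))
      · refine List.nodup_append.mpr ⟨h3, List.nodup_singleton u, ?_⟩
        intro a ha b hb
        rw [List.mem_singleton.mp hb]
        intro hau
        exact hu_nvis (hau ▸ ha)
      · rw [hc]
        simp only [List.length_append, List.length_cons, List.length_nil]
        push_cast
        ring
      · intro x
        have hsplit : (x ∈ vis ++ [u] ∨ x ∈ queue ++ ch)
            ↔ ((x ∈ vis ∨ x ∈ u :: queue) ∨ x ∈ ch) := by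
          simp only [List.mem_append, List.mem_cons]
          tauto
        rw [hsplit, h4 x]
        constructor
        · rintro ((rfl | ⟨h0, h1, hW, u', hu'vis, he'⟩) | hxch)
          · exact Or.inl rfl
          · exact Or.inr ⟨h0, h1, hW, u', List.mem_append.mpr (Or.inl hu'vis), he'⟩
          · rcases (hch x).mp hxch with ⟨h0, h1, he, hW⟩
            exact Or.inr ⟨h0, h1, hW, u, List.mem_append.mpr (Or.inr (List.mem_singleton_self u)), he⟩
        · rintro (rfl | ⟨h0, h1, hW, u', hu'mem, he'⟩)
          · exact Or.inl (Or.inl rfl)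
          · rcases List.mem_append.mp hu'mem with hu'vis | hu'u
            · exact Or.inl (Or.inr ⟨h0, h1, hW, u', hu'vis, he'⟩)
            · refine Or.inr ((hch x).mpr ⟨h0, h1, ?_, hW⟩)
              rw [he', List.mem_singleton.mp hu'u]
      · intro x hx
        have hx' : (x ∈ vis ∨ x ∈ u :: queue) ∨ x ∈ ch := by
          rcases hx with hx | hx
          · rcases List.mem_append.mp hx with h | h
            · exact Or.inl (Or.inl h)
            · exact Or.inl (Or.inr (List.mem_cons.mpr (Or.inl (List.mem_singleton.mp h))))
          · rcases List.mem_append.mp hx with h | h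
            · exact Or.inl (Or.inr (List.mem_cons_of_mem u h))
            · exact Or.inr h
        rcases hx' with hx' | hxch
        · exact h5 x hx'
        · rcases (hch x).mp hxch with ⟨h0, h1, he, hW⟩
          rcases h5 u (Or.inr (List.mem_cons_self ..)) with rfl | ⟨hu0, hu1, huW, k, hRk⟩
          · exact Or.inr ⟨h0, h1, hW, 0, by rw [he]; rfl⟩
          · exact Or.inr ⟨h0, h1, hW, k + 1, by rw [he]; exact ⟨u, rfl, hu0, hu1, huW, hRk⟩⟩
      · simp only [List.length_append, List.length_cons, List.length_nil]
        omega

-- ===== VERDICT (by name: the statement is the Claim_ definition above) =====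
theorem count_subtree_descendants_py_spec : Claim_equal_count_subtree_descendants_py := by
  intro pred root W _ _
  unfold Spec_count_subtree_descendants_py
  unfold count_subtree_descendants_py count_subtree_descendants_py_alt
  cases h : PySem.List.pyGet? pred root with
  | none => rfl
  | some p =>
    cases p with
    | some _ => rfl
    | none =>
      simp only
      rw [aLoop_spec pred root W h (pred.length + 1) [root] PySem.Set.empty 1
          (by simp) (by simp [PySem.Set.empty]) (by simp [PySem.Set.empty])
          (by simp [PySem.Set.empty]) (by
            intro x
            simp [PySem.Set.empty, eq_comm])
          (by
            intro x hx
            simp [PySem.Set.empty] at hx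
            exact Or.inl hx)
          (by simp [PySem.Set.empty])]
      rw [PySem.List.foldl_count_if
        (fun v => W.contains v && climbB pred root W pred.length (PySem.List.pyGetD pred v none))
        (PySem.List.pyRange 0 (pred.length : Int) 1) 1]
      rfl
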